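-- pv_equiv track=rewrite | github.com/feirik/Writeups | guessing_game_4/solve.py | make_list_tenth
-- ===== SOURCE A (Python) =====
-- def make_list_tenth(false_count_list):
--     zero_false_list = []
--     one_false_list = []
--     two_false_list = []
--     three_false_list = []
--
--     iter = 0
--     for i in false_count_list:
--         if i == 0:
--             zero_false_list.append(iter)
--         if i == 1:
--             one_false_list.append(iter)
--         if i == 2:
--             two_false_list.append(iter)
--         if i == 3:
--             three_false_list.append(iter)
--         iter += 1
--
--     remove_zero = zero_false_list[0:4]
--     remove_one = one_false_list[:36]
--     remove_two = two_false_list[:144]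
--     remove_three = three_false_list[:336]
--
--     test_list = remove_zero + remove_one + remove_two + remove_three
--
--     return test_list
-- ===== SOURCE B (Python) =====
-- def make_list_tenth(false_count_list):
--     caps = [4, 36, 144, 336]
--     result = []
--     for v, cap in enumerate(caps):
--         result += [i for i, x in enumerate(false_count_list) if x == v][:cap]
--     return result
-- ===== Notes on version B (the rewrite author's own statement) =====
-- stated objective: idiomatic
-- what changed: Replaces the single bucketing pass into four accumulator lists with four independent enumerate-filter scans (one per value 0..3), each truncated to its cap and concatenated.
import Mathlib
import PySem

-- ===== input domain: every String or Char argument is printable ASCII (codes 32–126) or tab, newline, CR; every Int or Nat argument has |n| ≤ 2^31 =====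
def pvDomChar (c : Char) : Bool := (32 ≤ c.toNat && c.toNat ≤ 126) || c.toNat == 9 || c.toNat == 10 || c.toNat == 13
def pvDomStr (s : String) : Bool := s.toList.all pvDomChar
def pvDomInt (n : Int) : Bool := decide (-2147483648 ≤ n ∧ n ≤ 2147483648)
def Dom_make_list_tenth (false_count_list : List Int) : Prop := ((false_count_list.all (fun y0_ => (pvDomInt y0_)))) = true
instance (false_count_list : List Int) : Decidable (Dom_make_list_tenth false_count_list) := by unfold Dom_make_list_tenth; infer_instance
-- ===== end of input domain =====

-- B replaces A's single bucketing pass (four accumulator lists built in one loop) by four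
-- independent enumerate-filter scans, one per value 0..3, each truncated to its cap (idiomatic).


-- ===== PORT A =====
-- one pass: state = (iter, zero_false_list, one_false_list, two_false_list, three_false_list)
def make_list_tenth (false_count_list : List Int) : List Int :=
  let st := false_count_list.foldl
    (fun (st : Int × List Int × List Int × List Int × List Int) (i : Int) =>
      let (iter, z, o, t2, t3) := st
      let z := if i == 0 then z ++ [iter] else z
      let o := if i == 1 then o ++ [iter] else o
      let t2 := if i == 2 then t2 ++ [iter] else t2
      let t3 := if i == 3 then t3 ++ [iter] else t3
      (iter + 1, z, o, t2, t3))
    (0, [], [], [], [])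
  let (_, z, o, t2, t3) := st
  let remove_zero := PySem.List.slice z (some 0) (some 4)
  let remove_one := PySem.List.slice o none (some 36)
  let remove_two := PySem.List.slice t2 none (some 144)
  let remove_three := PySem.List.slice t3 none (some 336)
  remove_zero ++ remove_one ++ remove_two ++ remove_three

-- ===== PORT B =====
-- for each (v, cap): a full scan [i for i,x in enumerate(l) if x == v][:cap], concatenated
def make_list_tenth_alt (false_count_list : List Int) : List Int :=
  [((0 : Int), 4), (1, 36), (2, 144), (3, 336)].foldl
    (fun (result : List Int) vc =>
      result ++
        (((PySem.List.enumerate false_count_list 0).filter (fun p => p.2 == vc.1)).map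
          Prod.fst).take vc.2)
    []

-- ===== PRECONDITION & SPEC =====
def Spec_make_list_tenth (false_count_list : List Int) (out : List Int) : Prop := out = make_list_tenth_alt false_count_list
instance (false_count_list : List Int) (out : List Int) : Decidable (Spec_make_list_tenth false_count_list out) := by unfold Spec_make_list_tenth; infer_instance

-- ===== CLAIM (what is proved, stated in full; the proofs are below) =====
def Claim_equal_make_list_tenth : Prop := ∀ (false_count_list : List Int), Dom_make_list_tenth false_count_list → Spec_make_list_tenth false_count_list (make_list_tenth false_count_list)

-- ===== LEMMAS AND PROOFS =====

-- B's per-value scan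
def pvBucket (l : List Int) (v : Int) (s : Int) : List Int :=
  ((PySem.List.enumerate l s).filter (fun p => p.2 == v)).map Prod.fst

theorem pvLoop_eq (l : List Int) :
    ∀ (s : Int) (z o t2 t3 : List Int),
      l.foldl
        (fun (st : Int × List Int × List Int × List Int × List Int) (i : Int) =>
          let (iter, z, o, t2, t3) := st
          let z := if i == 0 then z ++ [iter] else z
          let o := if i == 1 then o ++ [iter] else o
          let t2 := if i == 2 then t2 ++ [iter] else t2
          let t3 := if i == 3 then t3 ++ [iter] else t3
          (iter + 1, z, o, t2, t3))
        (s, z, o, t2, t3)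
      = (s + l.length, z ++ pvBucket l 0 s, o ++ pvBucket l 1 s,
         t2 ++ pvBucket l 2 s, t3 ++ pvBucket l 3 s) := by
  induction l with
  | nil => intro s z o t2 t3; simp [pvBucket, PySem.List.enumerate_nil]
  | cons x xs ih =>
    intro s z o t2 t3
    simp only [List.foldl_cons, ih]
    simp [pvBucket, PySem.List.enumerate_cons, List.filter_cons]
    refine ⟨by ring, ?_, ?_, ?_, ?_⟩ <;> split_ifs <;> simp

theorem make_list_tenth_eq_alt (l : List Int) :
    make_list_tenth l = make_list_tenth_alt l := by
  simp only [make_list_tenth, make_list_tenth_alt, pvLoop_eq l 0]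
  simp [PySem.List.slice_to, PySem.List.slice_zero_start, pvBucket]

-- ===== VERDICT (by name: the statement is the Claim_ definition above) =====
theorem make_list_tenth_spec : Claim_equal_make_list_tenth := by
  intro l _
  unfold Spec_make_list_tenth
  exact make_list_tenth_eq_alt l
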